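-- pv_equiv track=rewrite | github.com/KubinGH/logia-tryhard-saga | Ye Olde/Etap 3/2014/3.py | spotkanie
-- ===== SOURCE A (Python) =====
-- def cycle(iterable):
--     while True:
--         for item in iterable:
--             yield item
--
-- def zip_sum(first, second):
--     return (e1 + e2 for e1, e2 in zip(first, second))
--
-- def spotkanie(first_dirs, second_dirs):
--     dirs = {"g": (0, 1),
--             "d": (0, -1),
--             "p": (1, 0),
--             "l": (-1, 0)}
--
--     first_dirs = cycle(first_dirs)
--     second_dirs = cycle(second_dirs)
--
--     first_pos = (0, 0)
--     second_pos = (0, 0)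
--
--     for i in range(100):
--         first_dir =  next(first_dirs)
--         second_dir = next(second_dirs)
--
--         first_pos  = tuple(zip_sum(first_pos,  dirs[first_dir]))
--         second_pos = tuple(zip_sum(second_pos, dirs[second_dir]))
--
--         if first_pos == second_pos:
--             return i + 1
--
--
--     return 0
-- ===== SOURCE B (Python) =====
-- def spotkanie(first_dirs, second_dirs):
--     dirs = {"g": (0, 1),
--             "d": (0, -1),
--             "p": (1, 0),
--             "l": (-1, 0)}
--
--     def positions(s):
--         x = y = 0
--         out = []
--         for i in range(100):
--             dx, dy = dirs[s[i % len(s)]]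
--             x += dx
--             y += dy
--             out.append((x, y))
--         return out
--
--     for i, (p, q) in enumerate(zip(positions(first_dirs), positions(second_dirs))):
--         if p == q:
--             return i + 1
--     return 0
-- ===== Notes on version B (the rewrite author's own statement) =====
-- stated objective: alternative
-- what changed: Replaces the interleaved cycle-generator step-and-compare loop with a two-phase structure: each walker's 100 positions are built independently by prefix sums with modulo indexing, then a single enumerate-zip scan returns the first index where they coincide.
-- outside the precondition, e.g. on spotkanie('g', 'gx'): A returns 1, B raises KeyError
import Mathlib
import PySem

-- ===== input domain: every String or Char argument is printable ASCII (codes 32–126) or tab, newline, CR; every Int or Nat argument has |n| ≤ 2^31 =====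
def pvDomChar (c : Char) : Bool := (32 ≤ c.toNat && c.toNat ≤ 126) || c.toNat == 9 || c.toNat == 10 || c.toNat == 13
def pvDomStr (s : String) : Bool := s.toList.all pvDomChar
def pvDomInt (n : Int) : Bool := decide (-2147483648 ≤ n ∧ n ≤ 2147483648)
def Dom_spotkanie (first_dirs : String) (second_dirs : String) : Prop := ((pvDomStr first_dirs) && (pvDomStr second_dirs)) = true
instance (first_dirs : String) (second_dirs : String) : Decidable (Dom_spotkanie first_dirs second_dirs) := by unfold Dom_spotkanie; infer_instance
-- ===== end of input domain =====

-- B rebuilds A's walk as two independent prefix-sum position lists plus one enumerate-zip scan (alternative decomposition, same cost).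


-- ===== PORT A =====
-- the literal dict `dirs`
def pvDirsA : PySem.Dict Char (Int × Int) :=
  PySem.Dict.ofList [('g', (0, 1)), ('d', (0, -1)), ('p', (1, 0)), ('l', (-1, 0))]

-- dirs[first_dir]; the `none` case is Python's KeyError, excluded by Pre_ (the default is only a totality guard)
def pvDirA (c : Char) : Int × Int := (pvDirsA.get? c).getD (0, 0)

-- tuple(zip_sum(p, q)) on two pairs: componentwise sum
def pvZipSumA (p q : Int × Int) : Int × Int := (p.1 + q.1, p.2 + q.2)

-- next(cycle(full)) with `rem` the part of the current pass not yet yielded; on full = [] Python's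
-- cycle loops forever (excluded by Pre_), the (' ', []) arm is only a totality guard
def pvNextCyc (full rem : List Char) : Char × List Char :=
  match rem with
  | c :: rest => (c, rest)
  | [] =>
    match full with
    | c :: rest => (c, rest)
    | [] => (' ', [])

-- A's `for i in range(100)` loop: structural recursion on the remaining iteration count
def pvLoopA (full1 full2 : List Char) : Nat → Int → List Char → List Char → (Int × Int) → (Int × Int) → Int
  | 0, _, _, _, _, _ => 0
  | n + 1, i, rem1, rem2, p1, p2 =>
    let s1 := pvNextCyc full1 rem1
    let s2 := pvNextCyc full2 rem2
    let p1' := pvZipSumA p1 (pvDirA s1.1)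
    let p2' := pvZipSumA p2 (pvDirA s2.1)
    if p1' = p2' then i + 1
    else pvLoopA full1 full2 n (i + 1) s1.2 s2.2 p1' p2'

def spotkanie (first_dirs : String) (second_dirs : String) : Int :=
  pvLoopA first_dirs.toList second_dirs.toList 100 0 first_dirs.toList second_dirs.toList (0, 0) (0, 0)

-- ===== PORT B =====
def pvDirsB : PySem.Dict Char (Int × Int) :=
  PySem.Dict.ofList [('g', (0, 1)), ('d', (0, -1)), ('p', (1, 0)), ('l', (-1, 0))]

-- dirs[s[i % len(s)]]; missing key = KeyError and len(s) = 0 = ZeroDivisionError, both excluded by Pre_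
-- (the defaults are only totality guards)
def pvDirB (c : Char) : Int × Int := (pvDirsB.get? c).getD (0, 0)

-- positions(s): the n remaining prefix-sum positions, starting at loop index i with current position p
def pvPositions (s : List Char) : Nat → Nat → (Int × Int) → List (Int × Int)
  | 0, _, _ => []
  | n + 1, i, p =>
    let d := pvDirB (s.getD (i % s.length) ' ')
    let p' := (p.1 + d.1, p.2 + d.2)
    p' :: pvPositions s n (i + 1) p'

-- the enumerate(zip(..)) scan: first index (plus one) where the two positions coincide, else 0
def pvFindMeet : Int → List ((Int × Int) × (Int × Int)) → Int
  | _, [] => 0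
  | i, (p, q) :: rest => if p = q then i + 1 else pvFindMeet (i + 1) rest

def spotkanie_alt (first_dirs : String) (second_dirs : String) : Int :=
  pvFindMeet 0 ((pvPositions first_dirs.toList 100 0 (0, 0)).zip (pvPositions second_dirs.toList 100 0 (0, 0)))

-- ===== PRECONDITION & SPEC =====
-- valid direction strings: nonempty and made only of 'g',''d','p','l'
def pvOkDirs (l : List Char) : Bool :=
  !l.isEmpty && l.all (fun c => c == 'g' || c == 'd' || c == 'p' || c == 'l')

-- Pre_ excludes: empty direction strings (A's cycle generator loops forever, B raises
-- ZeroDivisionError) and strings containing a character outside "gdpl" (Python raises KeyError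
-- when that character is consumed; when the walk never consumes it A returns while B, which
-- always reads 100 characters, raises — see the cite in claim.json).
def Pre_spotkanie (first_dirs : String) (second_dirs : String) : Prop :=
  pvOkDirs first_dirs.toList = true ∧ pvOkDirs second_dirs.toList = true
instance (first_dirs : String) (second_dirs : String) : Decidable (Pre_spotkanie first_dirs second_dirs) := by
  unfold Pre_spotkanie; infer_instance

def pvWitness_spotkanie : String × String := ("g", "d")

def Spec_spotkanie (first_dirs : String) (second_dirs : String) (out : Int) : Prop := out = spotkanie_alt first_dirs second_dirs
instance (first_dirs : String) (second_dirs : String) (out : Int) : Decidable (Spec_spotkanie first_dirs second_dirs out) := by unfold Spec_spotkanie; infer_instance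

-- ===== CLAIM (what is proved, stated in full; the proofs are below) =====
def Claim_equal_spotkanie : Prop := ∀ (first_dirs : String) (second_dirs : String), Dom_spotkanie first_dirs second_dirs → Pre_spotkanie first_dirs second_dirs → Spec_spotkanie first_dirs second_dirs (spotkanie first_dirs second_dirs)

-- ===== LEMMAS AND PROOFS =====

-- the two dict lookups are the same function
lemma pvDirB_eq_pvDirA : pvDirB = pvDirA := rfl

-- one step of A's cycle generator, with the remaining pass a tail `drop r` of the full string:
-- it yields the character at index r % len (also j % len for any j ≡ r), and the new offset is r % len + 1
lemma pvNextCyc_drop (f : List Char) (hf : f ≠ []) (r j : Nat)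
    (hr : r ≤ f.length) (hj : r % f.length = j % f.length) :
    pvNextCyc f (f.drop r) = (f.getD (j % f.length) ' ', f.drop (r % f.length + 1)) ∧
      (r % f.length + 1) % f.length = (j + 1) % f.length ∧ r % f.length + 1 ≤ f.length := by
  have hlen : 0 < f.length := List.length_pos_iff.mpr hf
  have hmods : (r % f.length + 1) % f.length = (j + 1) % f.length := by
    rw [Nat.add_mod, Nat.mod_mod_of_dvd r dvd_rfl, hj, ← Nat.add_mod]
  refine ⟨?_, hmods, by have := Nat.mod_lt r hlen; omega⟩
  rcases Nat.lt_or_ge r f.length with h | h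
  · rw [List.drop_eq_getElem_cons h]
    have hrr : r % f.length = r := Nat.mod_eq_of_lt h
    rw [pvNextCyc, hrr, ← hj, hrr, List.getD_eq_getElem f ' ' h]
  · have hre : r = f.length := le_antisymm hr h
    subst hre
    rcases f with _ | ⟨c, rest⟩
    · exact absurd rfl hf
    · simp only [List.drop_length, pvNextCyc, Nat.mod_self, ← hj, Nat.mod_self]
      simp

-- the core correspondence: A's interleaved loop from the states `drop r1`/`drop r2` equals B's
-- scan of the zipped future position lists built from indices j1/j2 (with r ≡ j mod the length)
lemma pvLoopA_eq_scan (f1 f2 : List Char) (h1 : f1 ≠ []) (h2 : f2 ≠ []) :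
    ∀ (n : Nat) (r1 r2 j1 j2 : Nat) (p1 p2 : Int × Int) (i : Int),
      r1 ≤ f1.length → r2 ≤ f2.length →
      r1 % f1.length = j1 % f1.length → r2 % f2.length = j2 % f2.length →
      pvLoopA f1 f2 n i (f1.drop r1) (f2.drop r2) p1 p2
        = pvFindMeet i ((pvPositions f1 n j1 p1).zip (pvPositions f2 n j2 p2)) := by
  intro n
  induction n with
  | zero => intro _ _ _ _ _ _ _ _ _ _ _; rfl
  | succ n ih =>
    intro r1 r2 j1 j2 p1 p2 i hr1 hr2 hj1 hj2
    obtain ⟨e1, m1, l1⟩ := pvNextCyc_drop f1 h1 r1 j1 hr1 hj1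
    obtain ⟨e2, m2, l2⟩ := pvNextCyc_drop f2 h2 r2 j2 hr2 hj2
    rw [pvLoopA, e1, e2]
    simp only [pvPositions, pvZipSumA, pvDirB_eq_pvDirA, List.zip_cons_cons, pvFindMeet]
    split
    · rfl
    · exact ih (r1 % f1.length + 1) (r2 % f2.length + 1) (j1 + 1) (j2 + 1) _ _ (i + 1) l1 l2 m1 m2

-- a string satisfying pvOkDirs is nonempty
lemma pvOkDirs_ne_nil (l : List Char) (h : pvOkDirs l = true) : l ≠ [] := by
  intro hl
  rw [hl] at h
  exact absurd h (by decide)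

-- ===== VERDICT (by name: the statement is the Claim_ definition above) =====
theorem spotkanie_spec : Claim_equal_spotkanie := by
  intro f s _ hpre
  obtain ⟨hp1, hp2⟩ := hpre
  have h1 := pvOkDirs_ne_nil _ hp1
  have h2 := pvOkDirs_ne_nil _ hp2
  unfold Spec_spotkanie spotkanie spotkanie_alt
  have := pvLoopA_eq_scan f.toList s.toList h1 h2 100 0 0 0 0 (0, 0) (0, 0) 0
    (Nat.zero_le _) (Nat.zero_le _) rfl rfl
  simpa using this
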